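-- pv_equiv track=rewrite | github.com/Mauro42K/training-lab | api/services/daily_domain_rules.py | resolve_primary_device_name
-- ===== SOURCE A (Python) =====
-- from collections.abc import Iterable, Sequence
--
-- def resolve_primary_device_name(device_names: Sequence[str | None]) -> str | None:
--     normalized = {
--         item.strip()
--         for item in device_names
--         if item is not None and item.strip() != ""
--     }
--     if len(normalized) != 1:
--         return None
--     return next(iter(normalized))
-- ===== SOURCE B (Python) =====
-- def resolve_primary_device_name(device_names):
--     candidate = None
--     for item in device_names:
--         if item is None:
--             continue
--         name = item.strip()
--         if not name:
--             continue
--         if candidate is None: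
--             candidate = name
--         elif name != candidate:
--             return None
--     return candidate
-- ===== Notes on version B (the rewrite author's own statement) =====
-- stated objective: faster
-- what changed: Replaced the set-comprehension-then-size-check with a single pass that keeps one scalar candidate and returns None immediately on the first conflicting name; no set is built and each item is stripped once instead of twice.
import Mathlib
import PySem

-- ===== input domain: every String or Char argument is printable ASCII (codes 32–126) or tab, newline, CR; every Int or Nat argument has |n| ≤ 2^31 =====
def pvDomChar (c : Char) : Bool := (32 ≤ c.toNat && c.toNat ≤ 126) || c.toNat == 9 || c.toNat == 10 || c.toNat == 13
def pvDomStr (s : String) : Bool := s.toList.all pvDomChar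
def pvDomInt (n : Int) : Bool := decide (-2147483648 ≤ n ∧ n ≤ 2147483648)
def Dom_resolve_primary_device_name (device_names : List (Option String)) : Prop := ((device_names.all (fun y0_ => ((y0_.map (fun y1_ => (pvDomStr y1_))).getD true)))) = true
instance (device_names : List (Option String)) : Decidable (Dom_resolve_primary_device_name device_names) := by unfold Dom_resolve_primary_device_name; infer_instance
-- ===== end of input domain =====

-- B differs from A structurally: a single-pass scalar-candidate scan with early exit instead of building a set and testing its size; return values agree on all inputs.

-- ===== PORT A =====
-- the set comprehension: strip each non-None item, keep the non-empty results, as a Python set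
def pvStripItem (item : Option String) : Option String :=
  match item with
  | none => none
  | some s => if PySem.Str.strip s = "" then none else some (PySem.Str.strip s)

def resolve_primary_device_name (device_names : List (Option String)) : Option String :=
  let normalized : PySem.Set String := PySem.Set.ofList (device_names.filterMap pvStripItem)
  if normalized.length ≠ 1 then none
  else normalized.head?   -- next(iter(normalized)) on the singleton set

-- ===== PORT B =====
-- the loop of Source B: `cand` is the running candidate; returning none transliterates the early `return None`
def pvGoB (cand : Option String) : List (Option String) → Option String
  | [] => cand
  | item :: rest =>
    match item with
    | none => pvGoB cand rest
    | some s =>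
      let name := PySem.Str.strip s
      if name = "" then pvGoB cand rest
      else
        match cand with
        | none => pvGoB (some name) rest
        | some c => if name ≠ c then none else pvGoB cand rest

def resolve_primary_device_name_alt (device_names : List (Option String)) : Option String :=
  pvGoB none device_names

-- ===== PRECONDITION & SPEC =====
def Spec_resolve_primary_device_name (device_names : List (Option String)) (out : Option String) : Prop := out = resolve_primary_device_name_alt device_names
instance (device_names : List (Option String)) (out : Option String) : Decidable (Spec_resolve_primary_device_name device_names out) := by unfold Spec_resolve_primary_device_name; infer_instance

-- ===== CLAIM (what is proved, stated in full; the proofs are below) =====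
def Claim_equal_resolve_primary_device_name : Prop := ∀ (device_names : List (Option String)), Dom_resolve_primary_device_name device_names → Spec_resolve_primary_device_name device_names (resolve_primary_device_name device_names)

-- ===== LEMMAS AND PROOFS =====

-- B's scan over the raw list equals the same scan over the filtered stripped values
def pvGoV (cand : Option String) : List String → Option String
  | [] => cand
  | t :: rest =>
    match cand with
    | none => pvGoV (some t) rest
    | some c => if t ≠ c then none else pvGoV cand rest

theorem pvGoB_eq_goV (ds : List (Option String)) : ∀ cand, pvGoB cand ds = pvGoV cand (ds.filterMap pvStripItem) := by
  induction ds with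
  | nil => intro cand; rfl
  | cons item rest ih =>
    intro cand
    cases item with
    | none => simpa [pvGoB, pvStripItem, List.filterMap_cons] using ih cand
    | some s =>
      rw [List.filterMap_cons]
      by_cases h : PySem.Str.strip s = ""
      · simpa [pvGoB, pvStripItem, h] using ih cand
      · simp only [pvStripItem, if_neg h]
        cases cand with
        | none => simpa [pvGoB, h, pvGoV] using ih _
        | some c =>
          by_cases hc : PySem.Str.strip s = c
          · simpa [pvGoB, h, hc, pvGoV] using ih _
          · simp [pvGoB, h, hc, pvGoV]

theorem pvGoV_some (r : List String) : ∀ c, pvGoV (some c) r = if ∀ x ∈ r, x = c then some c else none := by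
  induction r with
  | nil => intro c; simp [pvGoV]
  | cons t rest ih =>
    intro c
    by_cases h : t = c
    · simp [pvGoV, h, ih c]
    · simp [pvGoV, h]

theorem pvSet_singleton {t : String} {r : List String} (h : ∀ x ∈ r, x = t) : PySem.Set.ofList (t :: r) = [t] := by
  induction r with
  | nil => rfl
  | cons y rest ih =>
    have hy : y = t := h y (List.mem_cons_self ..)
    have : PySem.Set.ofList (t :: y :: rest) = PySem.Set.ofList (t :: rest) := by
      simp [PySem.Set.ofList, List.foldl, hy, PySem.Set.add, PySem.Set.contains]
    rw [this]; exact ih (fun x hx => h x (List.mem_cons_of_mem _ hx))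

theorem pvSet_len_ne {t : String} {r : List String} (h : ¬ ∀ x ∈ r, x = t) : (PySem.Set.ofList (t :: r)).length ≠ 1 := by
  push Not at h
  obtain ⟨x, hx, hxt⟩ := h
  intro hlen
  have hmem_t : t ∈ PySem.Set.ofList (t :: r) := (PySem.Set.mem_ofList ..).2 (List.mem_cons_self ..)
  have hmem_x : x ∈ PySem.Set.ofList (t :: r) := (PySem.Set.mem_ofList ..).2 (List.mem_cons_of_mem _ hx)
  match hs : PySem.Set.ofList (t :: r), hlen with
  | [y], _ =>
    rw [hs] at hmem_t hmem_x
    simp at hmem_t hmem_x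
    exact hxt (hmem_x.trans hmem_t.symm)

theorem resolve_primary_device_name_spec : Claim_equal_resolve_primary_device_name := by
  intro ds _
  unfold Spec_resolve_primary_device_name resolve_primary_device_name resolve_primary_device_name_alt
  rw [pvGoB_eq_goV]
  cases hvs : ds.filterMap pvStripItem with
  | nil => simp [pvGoV, PySem.Set.ofList]
  | cons t r =>
    simp only [pvGoV, pvGoV_some]
    by_cases h : ∀ x ∈ r, x = t
    · rw [pvSet_singleton h, if_pos h]
      simp
    · simp [pvSet_len_ne h, h]
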